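-- pv_equiv track=rewrite | github.com/Vignesh-v02/Secure-Mail | main.py | stem_s
-- ===== SOURCE A (Python) =====
-- def stem_s(word):
--     ww=word.split(" ")
--     wd=[]
--
--     for wr in ww:
--         w1=len(wr)-1
--         w2=len(wr)
--         wrr=wr[w1:w2]
--         if wrr == 's':
--             wd.append(wr[:-1])
--         else:
--             wd.append(wr)
--     res=" ".join(wd)
--     return res
-- ===== SOURCE B (Python) =====
-- def stem_s(word):
--     n = len(word)
--     out = []
--     for i, c in enumerate(word):
--         if c == 's' and (i + 1 == n or word[i + 1] == ' '):
--             continue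
--         out.append(c)
--     return ''.join(out)
-- ===== Notes on version B (the rewrite author's own statement) =====
-- stated objective: alternative
-- what changed: Replaced split-on-space / per-token strip / rejoin with a single character pass that drops each letter s immediately followed by a space or the end of the string, never building a word list.
import Mathlib
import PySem

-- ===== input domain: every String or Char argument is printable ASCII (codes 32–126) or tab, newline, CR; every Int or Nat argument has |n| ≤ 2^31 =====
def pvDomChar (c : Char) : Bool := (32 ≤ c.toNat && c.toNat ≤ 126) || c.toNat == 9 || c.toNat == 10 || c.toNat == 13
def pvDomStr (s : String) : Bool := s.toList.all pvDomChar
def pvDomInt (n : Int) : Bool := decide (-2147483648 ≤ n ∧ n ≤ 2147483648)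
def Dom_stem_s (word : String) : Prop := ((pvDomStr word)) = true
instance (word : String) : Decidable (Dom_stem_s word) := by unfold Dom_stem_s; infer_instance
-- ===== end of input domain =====

-- B replaces A's split-on-space / per-token strip / rejoin with a single character pass
-- that drops each 's' immediately followed by a space or the end (alternative decomposition, same cost).

-- ===== PORT A =====
def stem_s (word : String) : String :=
  let ww : List (List Char) := PySem.Chars.splitOn word.toList " ".toList
  let wd : List (List Char) := ww.foldl (fun wd wr =>
    let w1 : Int := (wr.length : Int) - 1
    let w2 : Int := (wr.length : Int)
    let wrr := PySem.List.slice wr (some w1) (some w2)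
    if wrr = ['s'] then wd ++ [PySem.List.slice wr none (some (-1))]
    else wd ++ [wr]) []
  String.ofList (PySem.Chars.join " ".toList wd)

-- ===== PORT B =====
-- B's loop over enumerate(word) with the lookahead word[i+1] becomes structural
-- recursion over the char list, rest.head? playing the role of word[i+1]
def stemGoB : List Char → List Char
  | [] => []
  | c :: rest =>
    if c = 's' ∧ (rest = [] ∨ rest.head? = some ' ') then stemGoB rest
    else c :: stemGoB rest

def stem_s_alt (word : String) : String := String.ofList (stemGoB word.toList)

-- ===== PRECONDITION & SPEC =====
def Spec_stem_s (word : String) (out : String) : Prop := out = stem_s_alt word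
instance (word : String) (out : String) : Decidable (Spec_stem_s word out) := by unfold Spec_stem_s; infer_instance

-- ===== CLAIM (what is proved, stated in full; the proofs are below) =====
def Claim_equal_stem_s : Prop := ∀ (word : String), Dom_stem_s word → Spec_stem_s word (stem_s word)

-- ===== LEMMAS AND PROOFS =====

-- A's per-token action, in closed form
def stripA (wr : List Char) : List Char :=
  if wr.getLast? = some 's' then wr.dropLast else wr

-- reference split on a single space, structural
def spl : List Char → List (List Char)
  | [] => [[]]
  | c :: r => if c = ' ' then [] :: spl r else (spl r).modifyHead (c :: ·)

lemma spl_ne_nil (l : List Char) : spl l ≠ [] := by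
  induction l with
  | nil => simp [spl]
  | cons c r ih =>
    simp only [spl]
    split_ifs
    · simp
    · cases h : spl r with
      | nil => exact absurd h ih
      | cons a t => simp [List.modifyHead]

lemma spl_head_nil_iff (l : List Char) :
    (spl l).head? = some [] ↔ (l = [] ∨ l.head? = some ' ') := by
  cases l with
  | nil => simp [spl]
  | cons c r =>
    simp only [spl]
    split_ifs with h
    · simp [h]
    · cases hs : spl r with
      | nil => exact absurd hs (spl_ne_nil r)
      | cons a t => simp [List.modifyHead, h]

lemma go_nil (fuel : Nat) (cur : List Char) (acc : List (List Char)) :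
    PySem.Chars.splitOn.go [' '] (fuel+1) [] cur acc = (cur.reverse :: acc).reverse := by
  rw [PySem.Chars.splitOn.go]
  simp

lemma go_cons_space (fuel : Nat) (rest cur : List Char) (acc : List (List Char)) :
    PySem.Chars.splitOn.go [' '] (fuel+1) (' ' :: rest) cur acc
      = PySem.Chars.splitOn.go [' '] fuel rest [] (cur.reverse :: acc) := by
  rw [PySem.Chars.splitOn.go]
  simp [List.isPrefixOf]

lemma go_cons_ne (fuel : Nat) (c : Char) (rest cur : List Char) (acc : List (List Char))
    (h : ¬ c = ' ') :
    PySem.Chars.splitOn.go [' '] (fuel+1) (c :: rest) cur acc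
      = PySem.Chars.splitOn.go [' '] fuel rest (c :: cur) acc := by
  rw [PySem.Chars.splitOn.go]
  have hp : [' '].isPrefixOf (c :: rest) = false := by
    simp [List.isPrefixOf]; exact fun hh => absurd hh.symm h
  rw [hp]; simp

lemma go_spec : ∀ (fuel : Nat) (l cur : List Char) (acc : List (List Char)),
    l.length < fuel →
    PySem.Chars.splitOn.go [' '] fuel l cur acc
      = acc.reverse ++ (spl l).modifyHead (cur.reverse ++ ·) := by
  intro fuel
  induction fuel with
  | zero => intro l cur acc h; omega
  | succ fuel ih =>
    intro l cur acc h
    cases l with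
    | nil => simp [go_nil, spl, List.modifyHead]
    | cons c rest =>
      by_cases hc : c = ' '
      · subst hc
        rw [go_cons_space, ih rest [] (cur.reverse :: acc) (by simpa using Nat.lt_of_succ_lt_succ h)]
        simp only [spl, if_pos rfl]
        cases hs : spl rest with
        | nil => exact absurd hs (spl_ne_nil rest)
        | cons a t => simp [List.modifyHead]
      · rw [go_cons_ne fuel c rest cur acc hc,
            ih rest (c :: cur) acc (by simpa using Nat.lt_of_succ_lt_succ h)]
        simp only [spl, if_neg hc]
        cases hs : spl rest with
        | nil => exact absurd hs (spl_ne_nil rest)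
        | cons a t => simp [List.modifyHead]

lemma splitOn_space (l : List Char) : PySem.Chars.splitOn l [' '] = spl l := by
  unfold PySem.Chars.splitOn
  rw [go_spec (l.length + 1) l [] [] (by omega)]
  cases hs : spl l with
  | nil => exact absurd hs (spl_ne_nil l)
  | cons a t => simp [List.modifyHead]

-- the token body of A's loop equals stripA
lemma body_eq_stripA (wr : List Char) :
    (if PySem.List.slice wr (some ((wr.length : Int) - 1)) (some (wr.length : Int)) = ['s']
     then PySem.List.slice wr none (some (-1)) else wr) = stripA wr := by
  cases wr with
  | nil => simp [PySem.List.slice, stripA, PySem.List.clampIdx]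
  | cons d r =>
    have hlen : ((d :: r).length : Int) - 1 = ((r.length : Nat) : Int) := by
      push_cast; simp
    have hlen2 : ((d :: r).length : Int) = (((r.length + 1 : Nat)) : Int) := by
      push_cast [List.length_cons]; ring
    rw [hlen, hlen2, PySem.List.slice_natCast]
    have hdrop : (d :: r).drop r.length = [(d :: r).getLast (by simp)] := by
      have := List.drop_length_sub_one (l := d :: r) (by simp)
      simpa using this
    rw [hdrop]
    have htake : ([(d :: r).getLast (by simp)].take (r.length + 1 - r.length)) = [(d :: r).getLast (by simp)] := by
      simp
    rw [htake, PySem.List.slice_to_neg_one]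
    unfold stripA
    rw [List.getLast?_eq_some_getLast (l := d :: r) (by simp)]
    split_ifs with h1 h2 h2
    · rfl
    · simp at h1 h2; exact absurd h1 h2
    · simp at h1 h2; exact absurd h2 h1
    · rfl

lemma foldl_body (f : List Char → List Char) :
    ∀ (ww : List (List Char)) (acc : List (List Char)),
    ww.foldl (fun wd wr => wd ++ [f wr]) acc = acc ++ ww.map f := by
  intro ww
  induction ww with
  | nil => simp
  | cons a t ih => intro acc; simp [List.foldl_cons, ih]

lemma join_cons_char (sep : List Char) (c : Char) (x : List Char) (rest : List (List Char)) :
    PySem.Chars.join sep ((c :: x) :: rest) = c :: PySem.Chars.join sep (x :: rest) := by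
  cases rest with
  | nil => simp [PySem.Chars.join_singleton]
  | cons q rs => rw [PySem.Chars.join_cons_cons, PySem.Chars.join_cons_cons]; simp

lemma main_lemma : ∀ (l : List Char),
    PySem.Chars.join [' '] ((spl l).map stripA) = stemGoB l := by
  intro l
  induction l with
  | nil => simp [spl, stripA, PySem.Chars.join_singleton, stemGoB]
  | cons c r ih =>
    by_cases hc : c = ' '
    · subst hc
      have hsp : spl (' ' :: r) = [] :: spl r := by simp [spl]
      rw [hsp]
      cases hs : spl r with
      | nil => exact absurd hs (spl_ne_nil r)
      | cons h t =>
        rw [hs] at ih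
        simp only [List.map_cons] at ih ⊢
        rw [PySem.Chars.join_cons_cons]
        rw [show stemGoB (' ' :: r) = ' ' :: stemGoB r by simp [stemGoB]]
        simp [stripA, ← ih]
    · simp only [spl, if_neg hc]
      cases hs : spl r with
      | nil => exact absurd hs (spl_ne_nil r)
      | cons h t =>
        rw [hs] at ih
        have hhead : h = [] ↔ (r = [] ∨ r.head? = some ' ') := by
          have := spl_head_nil_iff r
          rw [hs] at this; simpa using this
        cases h with
        | nil =>
          -- first token of r is empty: r = [] or r starts with ' '
          have hr : r = [] ∨ r.head? = some ' ' := hhead.mp rfl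
          simp only [List.modifyHead, List.map_cons]
          by_cases hcs : c = 's'
          · subst hcs
            have hA : stripA ['s'] = [] := by simp [stripA]
            have hB : stemGoB ('s' :: r) = stemGoB r := by simp [stemGoB, hr]
            rw [hA, hB, ← ih]
            simp [stripA]
          · have hA : stripA [c] = [c] := by simp [stripA, hcs]
            have hB : stemGoB (c :: r) = c :: stemGoB r := by
              simp [stemGoB, hcs]
            rw [hA, hB, ← ih]
            rw [join_cons_char]
            simp [stripA]
        | cons d h' =>
          -- first token of r is nonempty: r starts with d ≠ ' '
          have hr : ¬ (r = [] ∨ r.head? = some ' ') := by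
            intro hcontra
            have : (d :: h' : List Char) = [] := hhead.mpr hcontra
            simp at this
          simp only [List.modifyHead, List.map_cons]
          have hA : stripA (c :: d :: h') = c :: stripA (d :: h') := by
            unfold stripA
            rw [List.getLast?_cons_cons]
            split_ifs <;> simp
          have hB : stemGoB (c :: r) = c :: stemGoB r := by
            rw [stemGoB]
            rw [if_neg (by intro h; exact hr h.2)]
          rw [hA, hB, join_cons_char, ← ih]
          simp

lemma stem_eq (l : List Char) :
    PySem.Chars.join [' ']
      ((PySem.Chars.splitOn l [' ']).foldl (fun wd wr =>
        let w1 : Int := (wr.length : Int) - 1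
        let w2 : Int := (wr.length : Int)
        let wrr := PySem.List.slice wr (some w1) (some w2)
        if wrr = ['s'] then wd ++ [PySem.List.slice wr none (some (-1))]
        else wd ++ [wr]) [])
    = stemGoB l := by
  have hbody : (fun (wd : List (List Char)) (wr : List Char) =>
      let w1 : Int := (wr.length : Int) - 1
      let w2 : Int := (wr.length : Int)
      let wrr := PySem.List.slice wr (some w1) (some w2)
      if wrr = ['s'] then wd ++ [PySem.List.slice wr none (some (-1))]
      else wd ++ [wr])
      = fun wd wr => wd ++ [stripA wr] := by
    funext wd wr
    show (if PySem.List.slice wr (some ((wr.length : Int) - 1)) (some (wr.length : Int)) = ['s']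
          then wd ++ [PySem.List.slice wr none (some (-1))] else wd ++ [wr]) = wd ++ [stripA wr]
    rw [← body_eq_stripA wr]
    split_ifs <;> rfl
  rw [hbody, foldl_body, splitOn_space]
  simpa using main_lemma l

-- ===== VERDICT (by name: the statement is the Claim_ definition above) =====
theorem stem_s_spec : Claim_equal_stem_s := by
  intro word _
  unfold Spec_stem_s stem_s stem_s_alt
  have hsep : (" " : String).toList = [' '] := rfl
  simp only [hsep]
  rw [stem_eq word.toList]
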